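-- pv_equiv track=rewrite | github.com/MAdriaansens/Intership_biozentrum | get_subgraph_central_node.py | potential_representative
-- ===== SOURCE A (Python) =====
-- def potential_representative(length_dict, top_percent_cent):
--     rep_potential = []
--     rep_pres = {}
--     found_rep = 0
--     for x in length_dict:
--         for y in top_percent_cent:
--             if x == y:
--                 rep_potential.append(x)
--
--         if x in rep_potential:
--             rep_pres[x] = 1
--         else:
--             rep_pres[x] = 0
--     return(rep_pres)
-- ===== SOURCE B (Python) =====
-- def potential_representative(length_dict, top_percent_cent):
--     # scatter: preinitialize every key to 0, then mark the centrality hits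
--     rep_pres = {x: 0 for x in length_dict}
--     for y in top_percent_cent:
--         if y in rep_pres:
--             rep_pres[y] = 1
--     return rep_pres
-- ===== Notes on version B (the rewrite author's own statement) =====
-- stated objective: faster
-- what changed: A gathers: for each key it scans all of top_percent_cent with a nested loop and a growing match list; B scatters: one pass presets every key to 0, then one pass over top_percent_cent marks present keys via an O(1) dict membership test, removing the inner scan.
import Mathlib
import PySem

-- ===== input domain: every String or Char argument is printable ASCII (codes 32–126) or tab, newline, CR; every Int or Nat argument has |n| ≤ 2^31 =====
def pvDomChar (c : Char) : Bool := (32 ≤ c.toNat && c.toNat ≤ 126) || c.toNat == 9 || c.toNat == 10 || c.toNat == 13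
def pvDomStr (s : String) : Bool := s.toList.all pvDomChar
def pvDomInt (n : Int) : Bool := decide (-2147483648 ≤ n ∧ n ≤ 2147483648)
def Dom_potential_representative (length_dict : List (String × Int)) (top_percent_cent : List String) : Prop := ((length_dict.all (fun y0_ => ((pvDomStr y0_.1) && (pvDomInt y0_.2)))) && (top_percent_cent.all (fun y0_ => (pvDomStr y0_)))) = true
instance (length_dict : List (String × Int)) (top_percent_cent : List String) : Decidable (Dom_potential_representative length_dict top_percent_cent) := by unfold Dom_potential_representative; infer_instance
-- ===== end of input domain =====

-- B replaces A's nested gather loops by a scatter: one pass presets every key to 0,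
-- a pass over top_percent_cent marks present keys via dict membership, removing the inner scan (objective: faster, measured).

-- ===== PORT A =====
-- 'for x in length_dict' iterates the dict's keys (insertion order, unique): (Dict.ofList length_dict).keys
def potential_representative (length_dict : List (String × Int)) (top_percent_cent : List String) : List (String × Int) :=
  let res := ((PySem.Dict.ofList length_dict).keys).foldl
    (fun (st : List String × PySem.Dict String Int) x =>
      let rep_potential := top_percent_cent.foldl
        (fun acc y => if x == y then acc ++ [x] else acc) st.1
      if rep_potential.contains x then (rep_potential, st.2.insert x 1)
      else (rep_potential, st.2.insert x 0))
    ([], PySem.Dict.empty)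
  res.2.items

-- ===== PORT B =====
def potential_representative_alt (length_dict : List (String × Int)) (top_percent_cent : List String) : List (String × Int) :=
  let rep_pres := ((PySem.Dict.ofList length_dict).keys).foldl
    (fun (d : PySem.Dict String Int) x => d.insert x 0) PySem.Dict.empty
  (top_percent_cent.foldl
    (fun (d : PySem.Dict String Int) y => if d.contains y then d.insert y 1 else d)
    rep_pres).items

-- ===== PRECONDITION & SPEC =====
def Spec_potential_representative (length_dict : List (String × Int)) (top_percent_cent : List String) (out : List (String × Int)) : Prop := out = potential_representative_alt length_dict top_percent_cent
instance (length_dict : List (String × Int)) (top_percent_cent : List String) (out : List (String × Int)) : Decidable (Spec_potential_representative length_dict top_percent_cent out) := by unfold Spec_potential_representative; infer_instance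

-- ===== CLAIM (what is proved, stated in full; the proofs are below) =====
def Claim_equal_potential_representative : Prop := ∀ (length_dict : List (String × Int)) (top_percent_cent : List String), Dom_potential_representative length_dict top_percent_cent → Spec_potential_representative length_dict top_percent_cent (potential_representative length_dict top_percent_cent)

-- ===== LEMMAS AND PROOFS =====

-- A's inner loop appends x once per match of x in top_percent_cent
theorem pv_inner_eq (x : String) (top : List String) (acc : List String) :
    top.foldl (fun acc y => if x == y then acc ++ [x] else acc) acc
      = acc ++ (top.filter (fun y => x == y)).map (fun _ => x) :=
  PySem.List.foldl_append_if (fun y => x == y) (fun _ => x) top acc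

theorem pv_mem_inner (x z : String) (top : List String) (acc : List String) :
    z ∈ top.foldl (fun acc y => if x == y then acc ++ [x] else acc) acc
      ↔ z ∈ acc ∨ (z = x ∧ x ∈ top) := by
  rw [pv_inner_eq]
  constructor
  · intro h
    rcases List.mem_append.mp h with h | h
    · exact Or.inl h
    · rcases List.mem_map.mp h with ⟨y, hy, rfl⟩
      rcases List.mem_filter.mp hy with ⟨hyt, he⟩
      exact Or.inr ⟨rfl, by rw [eq_of_beq he]; exact hyt⟩
  · rintro (h | ⟨rfl, hx⟩)
    · exact List.mem_append.mpr (Or.inl h)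
    · exact List.mem_append.mpr (Or.inr (List.mem_map.mpr ⟨z, List.mem_filter.mpr ⟨hx, by simp⟩, rfl⟩))

-- A's outer loop, with the invariant that every accumulated match is in top_percent_cent,
-- is an insert loop writing the membership flag
theorem pv_outer_eq (top : List String) :
    ∀ (ks : List String) (rp : List String) (d : PySem.Dict String Int),
      (∀ z ∈ rp, z ∈ top) →
      (ks.foldl
        (fun (st : List String × PySem.Dict String Int) x =>
          let rep_potential := top.foldl
            (fun acc y => if x == y then acc ++ [x] else acc) st.1
          if rep_potential.contains x then (rep_potential, st.2.insert x 1)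
          else (rep_potential, st.2.insert x 0))
        (rp, d)).2
      = ks.foldl (fun (d : PySem.Dict String Int) x =>
          d.insert x (if x ∈ top then 1 else 0)) d := by
  intro ks
  induction ks with
  | nil => intro rp d _; rfl
  | cons x ks ih =>
    intro rp d hrp
    simp only [List.foldl_cons]
    have hmem : x ∈ top.foldl (fun acc y => if x == y then acc ++ [x] else acc) rp ↔ x ∈ top := by
      rw [pv_mem_inner]
      constructor
      · rintro (h | ⟨-, h⟩)
        · exact hrp x h
        · exact h
      · intro h
        exact Or.inr ⟨rfl, h⟩
    have hinv : ∀ z ∈ top.foldl (fun acc y => if x == y then acc ++ [x] else acc) rp, z ∈ top := by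
      intro z hz
      rcases (pv_mem_inner x z top rp).mp hz with h | ⟨rfl, hx⟩
      · exact hrp z h
      · exact hx
    by_cases hx : x ∈ top
    · rw [if_pos (List.contains_iff_mem.mpr (hmem.mpr hx))]
      rw [ih _ _ hinv]
      simp [hx]
    · rw [if_neg (fun hc => hx (hmem.mp (List.contains_iff_mem.mp hc)))]
      rw [ih _ _ hinv]
      simp [hx]

-- an insert loop with a value depending only on the key: last write = any write
theorem pv_getD_insert_loop (f : String → Int) :
    ∀ (ks : List String) (d : PySem.Dict String Int) (k : String),
      (ks.foldl (fun (d : PySem.Dict String Int) x => d.insert x (f x)) d).getD k 0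
        = if k ∈ ks then f k else d.getD k 0 := by
  intro ks
  induction ks with
  | nil => intro d k; simp
  | cons x ks ih =>
    intro d k
    simp only [List.foldl_cons, ih, PySem.Dict.getD_insert, List.mem_cons]
    by_cases h1 : k ∈ ks <;> by_cases h2 : k = x <;> simp [h1, h2]

theorem pv_keys_insert_loop (f : String → Int) (ks : List String) (hnd : ks.Nodup) :
    (ks.foldl (fun (d : PySem.Dict String Int) x => d.insert x (f x)) PySem.Dict.empty).keys = ks := by
  rw [PySem.Dict.keys_foldl_insert]
  simp only [PySem.Dict.keys_empty, PySem.Set.update_nil_left]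
  exact PySem.Set.ofList_eq_self_of_nodup ks hnd

-- B's marking step never changes which keys are present
theorem pv_mark_contains (y k : String) (d : PySem.Dict String Int) :
    ((if d.contains y then d.insert y 1 else d) : PySem.Dict String Int).contains k = d.contains k := by
  by_cases hc : d.contains y
  · rw [if_pos hc, PySem.Dict.contains_insert]
    by_cases hk : k = y
    · subst hk; simp [hc]
    · simp [(by simpa using hk : (k == y) = false)]
  · rw [if_neg hc]

theorem pv_mark_keys (top : List String) :
    ∀ (d : PySem.Dict String Int),
      (top.foldl (fun (d : PySem.Dict String Int) y => if d.contains y then d.insert y 1 else d) d).keys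
        = d.keys := by
  induction top with
  | nil => intro d; rfl
  | cons y top ih =>
    intro d
    simp only [List.foldl_cons]
    rw [ih]
    by_cases hc : d.contains y
    · rw [if_pos hc, PySem.Dict.keys_insert_of_contains _ _ hc]
    · rw [if_neg hc]

theorem pv_mark_getD (top : List String) :
    ∀ (d : PySem.Dict String Int) (k : String),
      (top.foldl (fun (d : PySem.Dict String Int) y => if d.contains y then d.insert y 1 else d) d).getD k 0
        = if d.contains k = true ∧ k ∈ top then 1 else d.getD k 0 := by
  induction top with
  | nil => intro d k; simp
  | cons y top ih =>
    intro d k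
    simp only [List.foldl_cons, ih, pv_mark_contains, List.mem_cons]
    by_cases hck : d.contains k = true
    · by_cases hkt : k ∈ top
      · simp [hck, hkt]
      · simp only [hck, hkt, true_and, or_false, and_false, if_false]
        by_cases hky : k = y
        · subst hky
          simp [hck, PySem.Dict.getD_insert]
        · by_cases hcy : d.contains y
          · simp [hky, hcy, PySem.Dict.getD_insert]
          · simp [hky, hcy]
    · simp only [hck, false_and]
      by_cases hky : k = y
      · subst hky; simp [hck]
      · by_cases hcy : d.contains y
        · simp [hcy, PySem.Dict.getD_insert, hky]
        · simp [hcy]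

theorem potential_representative_eq (length_dict : List (String × Int)) (top : List String) :
    potential_representative length_dict top = potential_representative_alt length_dict top := by
  unfold potential_representative potential_representative_alt
  simp only []
  set ks := (PySem.Dict.ofList length_dict).keys with hks
  have hnd : ks.Nodup := PySem.Dict.nodup_keys_ofList length_dict
  rw [pv_outer_eq top ks [] PySem.Dict.empty (by intro z hz; simp at hz)]
  set f : String → Int := fun x => if x ∈ top then 1 else 0 with hf
  set DA := ks.foldl (fun (d : PySem.Dict String Int) x => d.insert x (f x)) PySem.Dict.empty with hDA
  set init := ks.foldl (fun (d : PySem.Dict String Int) x => d.insert x 0) PySem.Dict.empty with hinit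
  set DB := top.foldl (fun (d : PySem.Dict String Int) y => if d.contains y then d.insert y 1 else d) init with hDB
  have hkA : DA.keys = ks := pv_keys_insert_loop f ks hnd
  have hki : init.keys = ks := pv_keys_insert_loop (fun _ => 0) ks hnd
  have hkB : DB.keys = ks := by rw [hDB, pv_mark_keys, hki]
  rw [PySem.Dict.items_eq_map_keys DA (hkA ▸ hnd) 0,
      PySem.Dict.items_eq_map_keys DB (hkB ▸ hnd) 0, hkA, hkB]
  apply List.map_congr_left
  intro k hk
  have hgA : DA.getD k 0 = f k := by
    rw [hDA, pv_getD_insert_loop, if_pos hk]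
  have hci : init.contains k = true := by
    rw [PySem.Dict.contains_eq_decide_mem_keys, hki]; simpa using hk
  have hgi : init.getD k 0 = 0 := by
    rw [hinit, pv_getD_insert_loop]; simp
  have hgB : DB.getD k 0 = f k := by
    rw [hDB, pv_mark_getD, hci, hgi, hf]
    by_cases ht : k ∈ top <;> simp [ht]
  rw [hgA, hgB]

-- ===== VERDICT (by name: the statement is the Claim_ definition above) =====
theorem potential_representative_spec : Claim_equal_potential_representative := by
  intro length_dict top _
  exact potential_representative_eq length_dict top
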